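-- pv_equiv track=rewrite | github.com/madeibao/CTest | Huawei/最佳对手.py | getResutle
-- ===== SOURCE A (Python) =====
-- def getResutle(n, d, arr):
--     arr.sort()
--     diffs = []
--     for i in range(1, len(arr)):
--         diff = arr[i]-arr[i-1]
--         if diff<=d: # 从小到大排序的，结果相邻两个差额都大于d了，肯定不能配对。
--             diffs.append([i-1, i , diff]) # 有重复的 1,2配对，2和3配对。
--     if len(diffs) == 0: return -1
--     # return diffs
--     # [[0, 1, 29], [2, 3, 0], [3, 4, 6], [4, 5, 2]]
--     # 接下来处理重复配对的
--     res = []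
--     dfs(0, diffs, [], res)
--     res.sort(key=lambda x:(-x[0], x[1])) # 先看组合数，组合数最多， 如果组合数相同，看差最小。排序就是这样的。
--     return res[0][1] # 返回的是和值最小的那个
--
-- def dfs(index, diffs, path, res):
--     # 开始遍历
--     for i in range(index, len(diffs)):
--         if len(path)==0 or path[-1][1] < diffs[i][0]:# 把重复的去掉。
--             path.append(diffs[i])
--             dfs(i+1, diffs, path, res) # 牛掰。
--             '''
--             举个例子：
--             [[0, 1, 29], [2, 3, 0], [3, 4, 6], [4, 5, 2]]  diffs 的下标为0，进去，那么下标为1的进去，2的肯定进不了。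
--             调用一次dfs 把指针往下移动一个，就会出现，下标为1的进，下标为2的不能进，等到dfs 的indx等于2的时候下标为2的肯定进去
--             '''
--             count = len(path) # 计算组合了多少个。
--             sumDiff = sum(map(lambda x:x[2], path)) # 求出差别的和。
--             # 添加到res里
--             res.append([count, sumDiff])
--             path.pop() # 这里没搞清
-- ===== SOURCE B (Python) =====
-- def getResutle(n, d, arr):
--     # linear DP over the sorted array instead of exhaustive chain enumeration
--     arr.sort()
--     dp1 = (0, 0)  # best (pair count, diff sum) for the suffix arr[i:]
--     dp2 = (0, 0)  # best for the suffix arr[i+1:]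
--     for i in range(len(arr) - 2, -1, -1):
--         best = dp1
--         diff = arr[i + 1] - arr[i]
--         if diff <= d:
--             cand = (dp2[0] + 1, dp2[1] + diff)
--             if cand[0] > best[0] or (cand[0] == best[0] and cand[1] < best[1]):
--                 best = cand
--         dp2, dp1 = dp1, best
--     return dp1[1] if dp1[0] > 0 else -1
-- ===== Notes on version B (the rewrite author's own statement) =====
-- stated objective: alternative
-- what changed: A enumerates every non-overlapping chain of adjacent close pairs by recursive DFS and sorts all results to pick the best; B replaces the enumeration by a linear DP over the sorted array that keeps the best (pair count, diff sum) for the two most recent suffixes.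
import Mathlib
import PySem

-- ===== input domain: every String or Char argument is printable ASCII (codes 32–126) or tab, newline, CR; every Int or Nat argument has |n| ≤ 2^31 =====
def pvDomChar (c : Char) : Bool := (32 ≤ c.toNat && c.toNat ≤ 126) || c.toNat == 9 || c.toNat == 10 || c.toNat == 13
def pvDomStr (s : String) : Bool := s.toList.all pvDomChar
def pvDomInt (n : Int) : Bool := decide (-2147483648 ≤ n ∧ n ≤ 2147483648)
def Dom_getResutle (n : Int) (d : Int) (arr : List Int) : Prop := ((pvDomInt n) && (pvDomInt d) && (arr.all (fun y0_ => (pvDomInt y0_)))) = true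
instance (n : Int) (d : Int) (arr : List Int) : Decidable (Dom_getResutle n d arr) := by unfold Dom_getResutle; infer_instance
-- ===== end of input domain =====

-- B replaces A's recursive DFS enumeration of all non-overlapping adjacent-pair chains by a
-- linear DP over the sorted array (objective: alternative algorithm). Both Pythons sort arr in
-- place; the equivalence proved here is about the return value only.

-- ===== PORT A =====
-- dfs(index, diffs, path, res): the first argument is the suffix diffs[index:]
def dfsA : List (Int × Int × Int) → List (Int × Int × Int) → List (Int × Int) → List (Int × Int)
  | [], _, res => res
  | e :: rest, path, res =>
    if path.length = 0 ∨ ((PySem.List.pyGet? path (-1)).getD (0, 0, 0)).2.1 < e.1 then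
      -- path.append(diffs[i]); dfs(i+1, …); res.append([count, sumDiff]); path.pop()
      let path' := path ++ [e]
      let res' := dfsA rest path' res
      let count : Int := path'.length
      let sumDiff : Int := (path'.map (fun x => x.2.2)).sum
      dfsA rest path (res' ++ [(count, sumDiff)])
    else
      dfsA rest path res

def getResutle (n : Int) (d : Int) (arr : List Int) : Int :=
  let s := PySem.List.sorted arr (fun x => x)
  let diffs := (PySem.List.pyRange 1 (PySem.List.len s) 1).foldl
    (fun acc i =>
      let diff := PySem.List.pyGetD s i 0 - PySem.List.pyGetD s (i - 1) 0
      if diff ≤ d then acc ++ [(i - 1, i, diff)] else acc) []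
  if diffs.length = 0 then -1
  else
    let res := dfsA diffs [] []
    let res2 := PySem.List.sorted2 res (fun x => -x.1) (fun x => x.2)
    (PySem.List.pyGetD res2 0 (0, 0)).2

-- ===== PORT B =====
-- the backward loop 'for i in range(len(arr)-2, -1, -1)' over (dp1, dp2), as structural
-- recursion on the sorted list: altGo d s = (dp1 for suffix s, dp1 for the tail of s)
def altGo (d : Int) : List Int → ((Int × Int) × (Int × Int))
  | [] => ((0, 0), (0, 0))
  | [_] => ((0, 0), (0, 0))
  | x :: y :: r =>
    let p := altGo d (y :: r)
    let dp1 := p.1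
    let dp2 := p.2
    let diff := y - x
    let best :=
      if diff ≤ d then
        let cand := (dp2.1 + 1, dp2.2 + diff)
        if cand.1 > dp1.1 ∨ (cand.1 = dp1.1 ∧ cand.2 < dp1.2) then cand else dp1
      else dp1
    (best, dp1)

def getResutle_alt (n : Int) (d : Int) (arr : List Int) : Int :=
  let s := PySem.List.sorted arr (fun x => x)
  let dp1 := (altGo d s).1
  if dp1.1 > 0 then dp1.2 else -1

-- ===== PRECONDITION & SPEC =====
def Spec_getResutle (n : Int) (d : Int) (arr : List Int) (out : Int) : Prop := out = getResutle_alt n d arr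
instance (n : Int) (d : Int) (arr : List Int) (out : Int) : Decidable (Spec_getResutle n d arr out) := by unfold Spec_getResutle; infer_instance

-- ===== CLAIM (what is proved, stated in full; the proofs are below) =====
def Claim_equal_getResutle : Prop := ∀ (n : Int) (d : Int) (arr : List Int), Dom_getResutle n d arr → Spec_getResutle n d arr (getResutle n d arr)

-- ===== LEMMAS AND PROOFS =====

-- admissibility of a diffs entry after a chain whose last right index is b
def okB (b : Option Int) (e : Int × Int × Int) : Bool :=
  match b with
  | none => true
  | some t => decide (t < e.1)

-- all nonempty valid chains (selections of pairwise non-overlapping entries, in order)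
def chains (b : Option Int) : List (Int × Int × Int) → List (List (Int × Int × Int))
  | [] => []
  | e :: r =>
    if okB b e then ((chains (some e.2.1) r).map (e :: ·)) ++ [e] :: chains b r
    else chains b r

def entryOf (c : List (Int × Int × Int)) : Int × Int :=
  ((c.length : Int), (c.map (fun x => x.2.2)).sum)

-- "a is at least as good as b": more pairs, or equally many with a diff sum ≤
def kle (a b : Int × Int) : Prop := b.1 < a.1 ∨ (a.1 = b.1 ∧ a.2 ≤ b.2)

def bmin (a b : Int × Int) : Int × Int :=
  if b.1 < a.1 ∨ (a.1 = b.1 ∧ a.2 < b.2) then a else b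

-- the optimum (max count, then min diff sum) over all chains of l admissible after b, incl. the empty chain
def Fb (b : Option Int) : List (Int × Int × Int) → Int × Int
  | [] => (0, 0)
  | e :: r =>
    if okB b e then
      bmin ((Fb (some e.2.1) r).1 + 1, (Fb (some e.2.1) r).2 + e.2.2) (Fb b r)
    else Fb b r

-- the diffs list A builds, as structural recursion on the sorted list with base index k
def mkDiffs (d : Int) : Int → List Int → List (Int × Int × Int)
  | _, [] => []
  | _, [_] => []
  | k, x :: y :: r => (if y - x ≤ d then [(k, k + 1, y - x)] else []) ++ mkDiffs d (k + 1) (y :: r)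

lemma pyGet?_neg_one {α : Type} (l : List α) (h : l ≠ []) :
    PySem.List.pyGet? l (-1) = l.getLast? := by
  have h1 : 1 ≤ l.length := List.length_pos_iff.mpr h
  simp [PySem.List.pyGet?, PySem.List.pyIdx?, h1, List.getLast?_eq_getElem?]

lemma dfsA_eq (r : List (Int × Int × Int)) : ∀ (path : List (Int × Int × Int)) (res : List (Int × Int)),
    dfsA r path res = res ++ (chains (path.getLast?.map (fun t => t.2.1)) r).map (fun c => entryOf (path ++ c)) := by
  induction r with
  | nil => intro path res; simp [dfsA, chains]
  | cons e rest ih =>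
    intro path res
    have hcond : (path.length = 0 ∨ ((PySem.List.pyGet? path (-1)).getD (0,0,0)).2.1 < e.1)
        ↔ okB (path.getLast?.map (fun t => t.2.1)) e = true := by
      by_cases hp : path = []
      · subst hp; simp [okB]
      · have hg := pyGet?_neg_one path hp
        obtain ⟨t, ht⟩ := Option.isSome_iff_exists.mp (List.getLast?_isSome.mpr hp)
        simp [hg, ht, okB, List.length_eq_zero_iff, hp]
    unfold dfsA chains
    by_cases hok : okB (path.getLast?.map (fun t => t.2.1)) e = true
    · rw [if_pos (hcond.mpr hok), if_pos hok]
      dsimp only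
      rw [ih (path ++ [e]) res, ih path]
      have hlast : (((path ++ [e]).getLast?).map (fun t => t.2.1)) = some e.2.1 := by
        simp
      rw [hlast]
      simp [entryOf, List.map_map, Function.comp_def, List.append_assoc]
    · rw [if_neg (fun h => hok (hcond.mp h)), if_neg hok]
      exact ih path res

lemma chains_ne_nil (l : List (Int × Int × Int)) : ∀ (b : Option Int), ∀ c ∈ chains b l, c ≠ [] := by
  induction l with
  | nil => simp [chains]
  | cons e r ih =>
    intro b c hc
    unfold chains at hc
    split at hc
    · rcases List.mem_append.1 hc with h | h
      · obtain ⟨c', _, rfl⟩ := List.mem_map.1 h; simp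
      · rcases List.mem_cons.1 h with rfl | h
        · simp
        · exact ih b c h
    · exact ih b c hc

lemma kle_bmin_left (a b : Int × Int) : kle (bmin a b) a := by
  unfold kle bmin; split_ifs <;> omega

lemma kle_bmin_right (a b : Int × Int) : kle (bmin a b) b := by
  unfold kle bmin; split_ifs <;> omega

lemma bmin_eq_or (a b : Int × Int) : bmin a b = a ∨ bmin a b = b := by
  unfold bmin; split_ifs <;> simp

lemma kle_trans {a b c : Int × Int} (h1 : kle a b) (h2 : kle b c) : kle a c := by
  unfold kle at *; omega

lemma kle_add {a b : Int × Int} (v : Int) (h : kle a b) :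
    kle (a.1 + 1, a.2 + v) (b.1 + 1, b.2 + v) := by
  unfold kle at *; simp; omega

lemma entryOf_cons (e : Int × Int × Int) (c : List (Int × Int × Int)) :
    entryOf (e :: c) = ((entryOf c).1 + 1, (entryOf c).2 + e.2.2) := by
  simp [entryOf]
  ring

lemma entryOf_pos_of_ne_nil {c : List (Int × Int × Int)} (h : c ≠ []) :
    kle (entryOf c) (0, 0) := by
  have := List.length_pos_iff.mpr h
  unfold kle entryOf; left; simpa using this

lemma Fb_min (l : List (Int × Int × Int)) : ∀ (b : Option Int),
    (Fb b l = (0, 0) ∨ ∃ c ∈ chains b l, Fb b l = entryOf c) ∧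
    (∀ c ∈ chains b l, kle (Fb b l) (entryOf c)) := by
  induction l with
  | nil => intro b; constructor
           · exact Or.inl rfl
           · simp [chains]
  | cons e r ih =>
    intro b
    by_cases hok : okB b e = true
    · have hF : Fb b (e :: r) = bmin ((Fb (some e.2.1) r).1 + 1, (Fb (some e.2.1) r).2 + e.2.2) (Fb b r) := by
        rw [Fb, if_pos hok]
      have hC : chains b (e :: r) =
          ((chains (some e.2.1) r).map (e :: ·)) ++ [e] :: chains b r := by
        rw [chains, if_pos hok]
      -- kle of the inner optimum against the empty chain
      have hz : kle (Fb (some e.2.1) r) (0, 0) := by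
        rcases (ih (some e.2.1)).1 with h0 | ⟨c, hc, hce⟩
        · rw [h0]; unfold kle; right; simp
        · rw [hce]; exact entryOf_pos_of_ne_nil (chains_ne_nil r (some e.2.1) c hc)
      have htake : kle ((Fb (some e.2.1) r).1 + 1, (Fb (some e.2.1) r).2 + e.2.2) (entryOf [e]) := by
        have := kle_add e.2.2 hz
        simpa [entryOf] using this
      rw [hF, hC]
      constructor
      · rcases bmin_eq_or ((Fb (some e.2.1) r).1 + 1, (Fb (some e.2.1) r).2 + e.2.2) (Fb b r) with hbm | hbm
        · rcases (ih (some e.2.1)).1 with h0 | ⟨c, hc, hce⟩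
          · right
            refine ⟨[e], by simp, ?_⟩
            rw [hbm, h0, entryOf_cons]; simp [entryOf]
          · right
            refine ⟨e :: c, List.mem_append.2 (Or.inl (List.mem_map.2 ⟨c, hc, rfl⟩)), ?_⟩
            rw [hbm, hce, entryOf_cons]
        · rcases (ih b).1 with h0 | ⟨c, hc, hce⟩
          · exact Or.inl (hbm.trans h0)
          · exact Or.inr ⟨c, List.mem_append.2 (Or.inr (List.mem_cons_of_mem _ hc)), hbm.trans hce⟩
      · intro c hc
        rcases List.mem_append.1 hc with h | h
        · obtain ⟨c', hc', rfl⟩ := List.mem_map.1 h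
          refine kle_trans (kle_bmin_left _ _) ?_
          rw [entryOf_cons]
          exact kle_add e.2.2 ((ih (some e.2.1)).2 c' hc')
        · rcases List.mem_cons.1 h with rfl | h
          · exact kle_trans (kle_bmin_left _ _) htake
          · exact kle_trans (kle_bmin_right _ _) ((ih b).2 c h)
    · have hF : Fb b (e :: r) = Fb b r := by rw [Fb, if_neg hok]
      have hC : chains b (e :: r) = chains b r := by rw [chains, if_neg hok]
      rw [hF, hC]; exact ih b

lemma mkDiffs_append (d : Int) : ∀ (s : List Int) (k z w : Int), s.getLast? = some w →
    mkDiffs d k (s ++ [z]) = mkDiffs d k s ++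
      (if z - w ≤ d then [(k + s.length - 1, (k : Int) + s.length, z - w)] else []) := by
  intro s
  induction s with
  | nil => intro k z w h; simp at h
  | cons x s' ih =>
    intro k z w h
    cases s' with
    | nil =>
      simp at h; subst h
      show mkDiffs d k (x :: [z]) = _
      simp [mkDiffs]
    | cons y r =>
      have h2 : (y :: r).getLast? = some w := by
        rwa [List.getLast?_cons_cons] at h
      have hunf : mkDiffs d k (x :: ((y :: r) ++ [z])) =
          (if y - x ≤ d then [(k, k + 1, y - x)] else []) ++ mkDiffs d (k + 1) ((y :: r) ++ [z]) := rfl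
      have hunf2 : mkDiffs d k (x :: y :: r) =
          (if y - x ≤ d then [(k, k + 1, y - x)] else []) ++ mkDiffs d (k + 1) (y :: r) := rfl
      show mkDiffs d k (x :: ((y :: r) ++ [z])) = _
      rw [hunf, ih (k + 1) z w h2, hunf2]
      simp only [List.append_assoc]
      congr 2
      split_ifs with hle
      · simp only [List.length_cons, Prod.mk.injEq, List.cons.injEq, and_true]
        push_cast
        omega
      · rfl

lemma diffs_fold (d : Int) (s : List Int) :
    (PySem.List.pyRange 1 (PySem.List.len s) 1).foldl
      (fun acc i =>
        let diff := PySem.List.pyGetD s i 0 - PySem.List.pyGetD s (i - 1) 0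
        if diff ≤ d then acc ++ [(i - 1, i, diff)] else acc) [] = mkDiffs d 0 s := by
  suffices h : ∀ (acc : List (Int × Int × Int)),
      (PySem.List.pyRange 1 (PySem.List.len s) 1).foldl
        (fun acc i =>
          let diff := PySem.List.pyGetD s i 0 - PySem.List.pyGetD s (i - 1) 0
          if diff ≤ d then acc ++ [(i - 1, i, diff)] else acc) acc = acc ++ mkDiffs d 0 s by
    simpa using h []
  induction s using List.reverseRecOn with
  | nil =>
    intro acc
    simp [PySem.List.len, PySem.List.pyRange_one_eq_nil (by norm_num : (0:Int) ≤ 1), mkDiffs]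
  | append_singleton s z ih =>
    intro acc
    by_cases hs : s = []
    · subst hs
      simp [PySem.List.len, PySem.List.pyRange_one_eq_nil (by norm_num : (1:Int) ≤ 1), mkDiffs]
    · have hlen : 1 ≤ (s.length : Int) := by
        have := List.length_pos_iff.mpr hs; omega
      have hrange : PySem.List.pyRange 1 (PySem.List.len (s ++ [z])) 1 =
          PySem.List.pyRange 1 (s.length : Int) 1 ++ [(s.length : Int)] := by
        have : PySem.List.len (s ++ [z]) = (s.length : Int) + 1 := by
          simp [PySem.List.len]
        rw [this, PySem.List.pyRange_one_succ_right hlen]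
      rw [hrange, List.foldl_append]
      have hcongr : (PySem.List.pyRange 1 (s.length : Int) 1).foldl
          (fun acc i =>
            let diff := PySem.List.pyGetD (s ++ [z]) i 0 - PySem.List.pyGetD (s ++ [z]) (i - 1) 0
            if diff ≤ d then acc ++ [(i - 1, i, diff)] else acc) acc =
          (PySem.List.pyRange 1 (s.length : Int) 1).foldl
          (fun acc i =>
            let diff := PySem.List.pyGetD s i 0 - PySem.List.pyGetD s (i - 1) 0
            if diff ≤ d then acc ++ [(i - 1, i, diff)] else acc) acc := by
        apply PySem.List.foldl_congr_mem
        intro acc' i hi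
        have hi' := (PySem.List.mem_pyRange_one).1 hi
        have e1 : PySem.List.pyGetD (s ++ [z]) i 0 = PySem.List.pyGetD s i 0 := by
          rw [PySem.List.pyGetD_eq_getElem _ _ (by omega) (by simp; omega),
              PySem.List.pyGetD_eq_getElem _ _ (by omega) (by omega),
              List.getElem_append]
          rw [dif_pos (show i.toNat < s.length by omega)]
        have e2 : PySem.List.pyGetD (s ++ [z]) (i - 1) 0 = PySem.List.pyGetD s (i - 1) 0 := by
          rw [PySem.List.pyGetD_eq_getElem _ _ (by omega) (by simp; omega),
              PySem.List.pyGetD_eq_getElem _ _ (by omega) (by omega),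
              List.getElem_append]
          rw [dif_pos (show (i - 1).toNat < s.length by omega)]
        simp only [e1, e2]
      rw [hcongr]
      have hlt : PySem.List.len s = (s.length : Int) := by simp [PySem.List.len]
      rw [hlt] at ih
      rw [ih acc]
      obtain ⟨w, hw⟩ := Option.isSome_iff_exists.mp (List.getLast?_isSome.mpr hs)
      have hz : PySem.List.pyGetD (s ++ [z]) (s.length : Int) 0 = z := by
        have hlt2 : ((s.length : Int)) < ((s ++ [z]).length : Int) := by simp
        rw [PySem.List.pyGetD_eq_getElem _ _ (by omega) hlt2]
        simp
      have hwv : PySem.List.pyGetD (s ++ [z]) ((s.length : Int) - 1) 0 = w := by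
        have hlt2 : ((s.length : Int) - 1) < ((s ++ [z]).length : Int) := by
          simp only [List.length_append, List.length_cons, List.length_nil]
          push_cast
          omega
        rw [PySem.List.pyGetD_eq_getElem _ _ (by omega) hlt2]
        have hq : (s ++ [z])[((s.length : Int) - 1).toNat]? = some w := by
          rw [List.getElem?_append_left (by omega)]
          have hIdx : ((s.length : Int) - 1).toNat = s.length - 1 := by omega
          rw [hIdx]
          rw [← List.getLast?_eq_getElem?, hw]
        obtain ⟨hh, he⟩ := List.getElem?_eq_some_iff.mp hq
        exact he
      simp only [List.foldl_cons, List.foldl_nil]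
      rw [mkDiffs_append d s 0 z w hw]
      simp only [hz, hwv]
      split_ifs with hle
      · simp [List.append_assoc]
      · simp

def okLt (b : Option Int) (k : Int) : Prop :=
  match b with
  | none => True
  | some t => t < k

lemma altGo_snd (d : Int) (y : Int) (r : List Int) : (altGo d (y :: r)).2 = (altGo d r).1 := by
  cases r with
  | nil => rfl
  | cons z r' => rfl

lemma Fb_mkDiffs (d : Int) : ∀ (s : List Int),
    (∀ (k : Int) (b : Option Int), okLt b k → Fb b (mkDiffs d k s) = (altGo d s).1) ∧
    (∀ (k y : Int), Fb (some k) (mkDiffs d k (y :: s)) = (altGo d s).1) := by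
  suffices H : ∀ (m : Nat) (s : List Int), s.length ≤ m →
      ((∀ (k : Int) (b : Option Int), okLt b k → Fb b (mkDiffs d k s) = (altGo d s).1) ∧
       (∀ (k y : Int), Fb (some k) (mkDiffs d k (y :: s)) = (altGo d s).1)) by
    exact fun s => H s.length s le_rfl
  intro m
  induction m with
  | zero =>
    intro s hs
    have hnil : s = [] := List.length_eq_zero_iff.mp (Nat.le_zero.mp hs)
    subst hnil
    exact ⟨fun k b _ => rfl, fun k y => rfl⟩
  | succ m ihm =>
    intro s hs
    match s with
    | [] => exact ⟨fun k b _ => rfl, fun k y => rfl⟩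
    | [x] =>
      refine ⟨fun k b _ => rfl, ?_⟩
      intro k y
      show Fb (some k) (mkDiffs d k [y, x]) = (0, 0)
      have hM : mkDiffs d k [y, x] = (if x - y ≤ d then [(k, k + 1, x - y)] else []) ++ [] := rfl
      rw [hM, List.append_nil]
      split_ifs with h
      · show Fb (some k) [(k, k + 1, x - y)] = (0, 0)
        rw [Fb, if_neg (by simp [okB])]
        rfl
      · rfl
    | x :: y :: r =>
      have hlen : r.length + 2 ≤ m + 1 := by simpa using hs
      have Pyr := ihm (y :: r) (by simp; omega)
      have Pr := ihm r (by omega)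
      have hsnd : (altGo d (y :: r)).2 = (altGo d r).1 := altGo_snd d y r
      have hc1 : ∀ (k : Int) (b : Option Int), okLt b k →
          Fb b (mkDiffs d k (x :: y :: r)) = (altGo d (x :: y :: r)).1 := by
        intro k b hb
        have hb1 : okLt b (k + 1) := by cases b <;> (simp [okLt] at hb ⊢); omega
        have hM : mkDiffs d k (x :: y :: r) =
            (if y - x ≤ d then [(k, k + 1, y - x)] else []) ++ mkDiffs d (k + 1) (y :: r) := rfl
        have hA : altGo d (x :: y :: r) =
            (let p := altGo d (y :: r)
             let dp1 := p.1
             let dp2 := p.2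
             let diff := y - x
             let best :=
               if diff ≤ d then
                 let cand := (dp2.1 + 1, dp2.2 + diff)
                 if cand.1 > dp1.1 ∨ (cand.1 = dp1.1 ∧ cand.2 < dp1.2) then cand else dp1
               else dp1
             (best, dp1)) := rfl
        rw [hM, hA]
        by_cases hd : y - x ≤ d
        · rw [if_pos hd]
          show Fb b ((k, k + 1, y - x) :: mkDiffs d (k + 1) (y :: r)) = _
          rw [Fb, if_pos (by cases b <;> (simp [okB, okLt] at hb ⊢); omega)]
          have h1 : Fb (some ((k, (k:Int) + 1, y - x).2.1)) (mkDiffs d (k + 1) (y :: r)) = (altGo d r).1 :=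
            Pr.2 (k + 1) y
          have h2 : Fb b (mkDiffs d (k + 1) (y :: r)) = (altGo d (y :: r)).1 := Pyr.1 (k + 1) b hb1
          rw [h1, h2]
          dsimp only
          rw [if_pos hd, hsnd]
          rfl
        · rw [if_neg hd, List.nil_append]
          rw [Pyr.1 (k + 1) b hb1]
          dsimp only
          rw [if_neg hd]
      refine ⟨hc1, ?_⟩
      intro k y0
      have hM : mkDiffs d k (y0 :: x :: y :: r) =
          (if x - y0 ≤ d then [(k, k + 1, x - y0)] else []) ++ mkDiffs d (k + 1) (x :: y :: r) := rfl
      rw [hM]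
      by_cases h : x - y0 ≤ d
      · rw [if_pos h]
        show Fb (some k) ((k, k + 1, x - y0) :: mkDiffs d (k + 1) (x :: y :: r)) = _
        rw [Fb, if_neg (by simp [okB])]
        exact hc1 (k + 1) (some k) (by simp [okLt])
      · rw [if_neg h, List.nil_append]
        exact hc1 (k + 1) (some k) (by simp [okLt])

lemma sorted2_eq_sorted (xs : List (Int × Int)) :
    PySem.List.sorted2 xs (fun x => -x.1) (fun x => x.2) =
    PySem.List.sorted xs (fun x => (toLex (-x.1, x.2) : Int ×ₗ Int)) := by
  simp only [PySem.List.sorted2, PySem.List.sorted, if_neg (by decide : ¬ (false = true))]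
  congr 1
  funext acc x
  congr 1
  funext a b
  rw [Bool.eq_iff_iff]
  simp only [Bool.or_eq_true, Bool.and_eq_true, Bool.not_eq_true', decide_eq_true_eq,
    decide_eq_false_iff_not, Prod.Lex.lt_iff, ofLex_toLex]
  constructor <;> intro h <;> [skip; skip] <;> omega

lemma key_le_iff_kle (a b : Int × Int) :
    ((toLex (-a.1, a.2) : Int ×ₗ Int) ≤ toLex (-b.1, b.2)) ↔ kle a b := by
  rw [Prod.Lex.le_iff]
  unfold kle
  simp only [ofLex_toLex]
  omega

lemma kle_antisymm {a b : Int × Int} (h1 : kle a b) (h2 : kle b a) : a = b := by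
  unfold kle at h1 h2
  cases a; cases b
  simp_all
  omega

-- ===== VERDICT (by name: the statement is the Claim_ definition above) =====
theorem getResutle_spec : Claim_equal_getResutle := by
  unfold Claim_equal_getResutle
  intro n d arr _
  unfold Spec_getResutle getResutle getResutle_alt
  dsimp only
  rw [diffs_fold d (PySem.List.sorted arr (fun x => x))]
  have hF : Fb none (mkDiffs d 0 (PySem.List.sorted arr (fun x => x))) =
      (altGo d (PySem.List.sorted arr (fun x => x))).1 :=
    (Fb_mkDiffs d (PySem.List.sorted arr (fun x => x))).1 0 none trivial
  cases hD : mkDiffs d 0 (PySem.List.sorted arr (fun x => x)) with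
  | nil =>
    rw [hD] at hF
    rw [if_pos (by simp), ← hF]
    norm_num [Fb]
  | cons e l =>
    rw [hD] at hF
    rw [if_neg (by simp)]
    have hres : dfsA (e :: l) [] [] = (chains none (e :: l)).map (fun c => entryOf c) := by
      simpa using dfsA_eq (e :: l) [] []
    rw [hres, sorted2_eq_sorted]
    have hchains : chains none (e :: l) =
        ((chains (some e.2.1) l).map (e :: ·)) ++ [e] :: chains none l := by
      rw [chains, if_pos (show okB none e = true from rfl)]
    have hmem_e : [e] ∈ chains none (e :: l) := by
      rw [hchains]
      exact List.mem_append.2 (Or.inr (List.mem_cons_self ..))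
    have hres_ne : (chains none (e :: l)).map (fun c => entryOf c) ≠ [] := by
      simp [hchains]
    cases h2 : PySem.List.sorted ((chains none (e :: l)).map (fun c => entryOf c))
        (fun x => (toLex (-x.1, x.2) : Int ×ₗ Int)) with
    | nil => exact absurd ((PySem.List.sorted_eq_nil_iff _ _ _).1 h2) hres_ne
    | cons mhead tt =>
      have hminkey := PySem.List.key_head_sorted_le _ _ h2
      have hmmem : mhead ∈ (chains none (e :: l)).map (fun c => entryOf c) :=
        (PySem.List.sorted_perm _ _ _).mem_iff.1 (by rw [h2]; exact List.mem_cons_self ..)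
      obtain ⟨c0, hc0, hme⟩ := List.mem_map.1 hmmem
      have hFmin := Fb_min (e :: l) none
      have h1 : kle (Fb none (e :: l)) mhead := by
        rw [← hme]
        exact hFmin.2 c0 hc0
      have hm1 : 1 ≤ mhead.1 := by
        have hke := hminkey (entryOf [e]) (List.mem_map.2 ⟨[e], hmem_e, rfl⟩)
        have := (key_le_iff_kle mhead (entryOf [e])).1 hke
        unfold kle at this
        have he1 : (entryOf [e]).1 = 1 := by simp [entryOf]
        omega
      have hFv : Fb none (e :: l) = mhead := by
        rcases hFmin.1 with h0 | ⟨c1, hc1, hce⟩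
        · exfalso
          rw [h0] at h1
          unfold kle at h1
          simp at h1
          omega
        · have h3 := hminkey (entryOf c1) (List.mem_map.2 ⟨c1, hc1, rfl⟩)
          rw [← hce] at h3
          exact (kle_antisymm ((key_le_iff_kle mhead (Fb none (e :: l))).1 h3) h1).symm
      rw [← hF, hFv]
      rw [if_pos (by omega : mhead.1 > 0)]
      simp [PySem.List.pyGetD, PySem.List.pyGet?, PySem.List.pyIdx?]
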